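-- pv_equiv track=rewrite | github.com/lkwoo/CRA | Projects/D04_RF_Wheel/wheel_answer.py | get_1000_dollar
-- ===== SOURCE A (Python) =====
-- def get_1000_dollar(board, chance, ffirst, user_char):
--     result = 0
--     for line in range(len(board)):
--         for x in range(len(board[line])):
--             # 만약 퀴즈참가자가 요청한 문자가,
--             # 정답 문자열과 동일하다면
--             if board[line][x] == user_char:
--                 # lets first 점수인지 확인한다.
--                 if ffirst[line] == 0 and x == 0:
--                     result += 1000
--                     ffirst[line] = 1
--                     chance[line] = line
--                 elif ffirst[line] == 0 and x != 0:
--                     ffirst[line] = 1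
--     return result
-- ===== SOURCE B (Python) =====
-- def get_1000_dollar(board, chance, ffirst, user_char):
--     # The elif branch of the original never changes the result: a line scores
--     # 1000 exactly when its FIRST cell is user_char and its ffirst flag is 0.
--     # So the score is a closed-form count over first cells -- no scan of the
--     # rows is needed.  This re-implementation computes the return value only;
--     # it deliberately performs none of the in-place ffirst/chance mutations.
--     return 1000 * sum(1 for i, row in enumerate(board)
--                       if row[:1] == [user_char] and ffirst[i] == 0)
-- ===== Notes on version B (the rewrite author's own statement) =====
-- stated objective: simpler
-- what changed: Replaced the nested positional scan with interleaved mutation/elif bookkeeping by a closed-form count: the score is 1000 times the number of lines whose first cell equals user_char while ffirst is 0, so B reads only each line's first cell and never scans a row; B computes the return value only and performs none of A's in-place ffirst/chance mutations.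
import Mathlib
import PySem

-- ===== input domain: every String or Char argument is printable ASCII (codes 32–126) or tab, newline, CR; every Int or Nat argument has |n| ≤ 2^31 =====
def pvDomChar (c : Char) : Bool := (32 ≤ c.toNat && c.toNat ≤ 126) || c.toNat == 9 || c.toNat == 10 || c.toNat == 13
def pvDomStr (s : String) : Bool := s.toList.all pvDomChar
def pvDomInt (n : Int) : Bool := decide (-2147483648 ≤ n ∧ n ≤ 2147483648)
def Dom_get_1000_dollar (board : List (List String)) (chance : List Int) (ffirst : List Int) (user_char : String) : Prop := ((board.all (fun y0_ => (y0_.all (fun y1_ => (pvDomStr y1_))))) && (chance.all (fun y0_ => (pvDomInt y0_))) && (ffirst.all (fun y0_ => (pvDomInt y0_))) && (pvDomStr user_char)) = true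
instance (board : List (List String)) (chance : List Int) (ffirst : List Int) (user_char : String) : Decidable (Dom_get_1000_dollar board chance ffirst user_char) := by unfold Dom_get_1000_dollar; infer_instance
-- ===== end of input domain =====

-- B replaces A's nested scan by a closed-form count over first cells (the score is 1000 per line
-- whose first cell matches while ffirst is 0). A mutates chance/ffirst in place; B performs NO
-- mutation: the equivalence proved here is about the RETURN value only.

-- ===== PORT A =====
-- inner loop 'for x in range(len(board[line]))' as structural recursion over the row, carrying x;
-- state is (result, chance, ffirst); ffirst[line]/chance[line]= use pyGetD/pySetD, total forms,
-- exact under Pre_ (which excludes exactly the inputs where Python's indexing raises)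
def pvInnerA (uc : String) (line : Nat) : List String → Nat → Int × List Int × List Int → Int × List Int × List Int
  | [], _, st => st
  | c :: rest, x, (r, ch, ff) =>
      pvInnerA uc line rest (x + 1) <|
        if c == uc then
          if PySem.List.pyGetD ff (line : Int) 0 == 0 && x == 0 then
            (r + 1000, PySem.List.pySetD ch (line : Int) (line : Int), PySem.List.pySetD ff (line : Int) 1)
          else if PySem.List.pyGetD ff (line : Int) 0 == 0 && x != 0 then
            (r, ch, PySem.List.pySetD ff (line : Int) 1)
          else (r, ch, ff)
        else (r, ch, ff)

def pvOuterA (uc : String) : List (List String) → Nat → Int × List Int × List Int → Int × List Int × List Int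
  | [], _, st => st
  | row :: rows, line, st => pvOuterA uc rows (line + 1) (pvInnerA uc line row 0 st)

def get_1000_dollar (board : List (List String)) (chance : List Int) (ffirst : List Int) (user_char : String) : Int :=
  (pvOuterA user_char board 0 (0, chance, ffirst)).1

-- ===== PORT B =====
-- 'sum(1 for i, row in enumerate(board) if row[:1] == [user_char] and ffirst[i] == 0)'
-- as structural recursion over the enumerated board; row[:1] is PySem.List.slice, ffirst[i] is pyGetD
def pvCountB (uc : String) (ff : List Int) : List (Int × List String) → Int
  | [] => 0
  | (i, row) :: rest =>
      (if PySem.List.slice row none (some 1) == [uc] && (PySem.List.pyGetD ff i 0 == 0) then 1 else 0)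
        + pvCountB uc ff rest

def get_1000_dollar_alt (board : List (List String)) (chance : List Int) (ffirst : List Int) (user_char : String) : Int :=
  1000 * pvCountB user_char ffirst (PySem.List.enumerate board 0)

-- ===== PRECONDITION & SPEC =====
-- Pre_ excludes exactly the inputs where Python A raises IndexError: a line containing user_char
-- with index ≥ len(ffirst), or a line whose first cell matches with ffirst[line] == 0 and
-- index ≥ len(chance).
def Pre_get_1000_dollar (board : List (List String)) (chance : List Int) (ffirst : List Int) (user_char : String) : Prop :=
  ∀ i, i < board.length → user_char ∈ board.getD i [] →
    i < ffirst.length ∧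
      ((board.getD i []).head? = some user_char ∧ ffirst.getD i 0 = 0 → i < chance.length)
instance (board : List (List String)) (chance : List Int) (ffirst : List Int) (user_char : String) : Decidable (Pre_get_1000_dollar board chance ffirst user_char) := by unfold Pre_get_1000_dollar; infer_instance

def pvWitness_get_1000_dollar : List (List String) × List Int × List Int × String :=
  ([["a"], ["b", "a"], []], [5, 6], [0, 0], "a")

def Spec_get_1000_dollar (board : List (List String)) (chance : List Int) (ffirst : List Int) (user_char : String) (out : Int) : Prop := out = get_1000_dollar_alt board chance ffirst user_char
instance (board : List (List String)) (chance : List Int) (ffirst : List Int) (user_char : String) (out : Int) : Decidable (Spec_get_1000_dollar board chance ffirst user_char out) := by unfold Spec_get_1000_dollar; infer_instance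

-- ===== CLAIM (what is proved, stated in full; the proofs are below) =====
def Claim_equal_get_1000_dollar : Prop := ∀ (board : List (List String)) (chance : List Int) (ffirst : List Int) (user_char : String), Dom_get_1000_dollar board chance ffirst user_char → Pre_get_1000_dollar board chance ffirst user_char → Spec_get_1000_dollar board chance ffirst user_char (get_1000_dollar board chance ffirst user_char)

-- ===== LEMMAS AND PROOFS =====

-- if ffirst[line] ≠ 0 the inner loop is the identity
theorem pvInnerA_of_ne (uc : String) (line : Nat) (row : List String) :
    ∀ (x : Nat) (r : Int) (ch ff : List Int),
      (ff[line]?).getD 0 ≠ 0 →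
      pvInnerA uc line row x (r, ch, ff) = (r, ch, ff) := by
  induction row with
  | nil => intro x r ch ff _; rfl
  | cons c rest ih =>
      intro x r ch ff h
      simp only [pvInnerA]
      by_cases hc : c = uc <;> simp [hc, h, List.getD, ih (x + 1) r ch ff h]

-- if setting ffirst[line] := 1 is a no-op and x ≠ 0, the inner loop is the identity
theorem pvInnerA_of_set_eq (uc : String) (line : Nat) (row : List String) :
    ∀ (x : Nat) (r : Int) (ch ff : List Int), x ≠ 0 →
      ff.set line 1 = ff →
      pvInnerA uc line row x (r, ch, ff) = (r, ch, ff) := by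
  induction row with
  | nil => intro x r ch ff _ _; rfl
  | cons c rest ih =>
      intro x r ch ff hx hset
      simp only [pvInnerA]
      by_cases hc : c = uc <;>
        by_cases h0 : (ff[line]?).getD 0 = 0 <;>
          simp [hc, h0, hx, List.getD, hset, ih (x + 1) r ch ff (Nat.succ_ne_zero x) hset]

-- after ffirst[line] := 1 the rest of the line is inert
theorem pvInnerA_after_set (uc : String) (line : Nat) (row : List String)
    (x : Nat) (hx : x ≠ 0) (r : Int) (ch ff : List Int) :
    pvInnerA uc line row x (r, ch, ff.set line 1) = (r, ch, ff.set line 1) := by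
  by_cases hlt : line < ff.length
  · apply pvInnerA_of_ne
    simp [hlt]
  · have hset : ff.set line 1 = ff := List.set_eq_of_length_le (Nat.le_of_not_lt hlt)
    rw [hset]
    exact pvInnerA_of_set_eq uc line row x r ch ff hx hset

-- tail of a line whose first cell did not match: only the elif branch is reachable
theorem pvInnerA_tail (uc : String) (line : Nat) (rest : List String) :
    ∀ (x : Nat), x ≠ 0 → ∀ (r : Int) (ch ff : List Int),
      (ff[line]?).getD 0 = 0 →
      pvInnerA uc line rest x (r, ch, ff)
        = if uc ∈ rest then (r, ch, ff.set line 1) else (r, ch, ff) := by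
  induction rest with
  | nil => intro x _ r ch ff _; simp [pvInnerA]
  | cons d rest' ih =>
      intro x hx r ch ff h0
      simp only [pvInnerA]
      by_cases hd : d = uc
      · have := pvInnerA_after_set uc line rest' (x + 1) (Nat.succ_ne_zero x) r ch ff
        simp [hd, h0, hx, List.getD, this]
      · rw [show ((if d == uc then _ else (r, ch, ff)) : Int × List Int × List Int) = (r, ch, ff) by
              simp [hd]]
        rw [ih (x + 1) (Nat.succ_ne_zero x) r ch ff h0]
        simp [Ne.symm hd]

-- FULL CHARACTERISATION of A's inner loop over one line: the result component gains 1000 exactly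
-- when the first cell matches with ffirst read 0, and ffirst[line] is set to 1 exactly when the
-- line contains uc with ffirst read 0 (chance is existential: it does not feed the result)
theorem pvInnerA_char (uc : String) (line : Nat) (row : List String) (r : Int) (ch ff : List Int) :
    ∃ ch', pvInnerA uc line row 0 (r, ch, ff) =
      (r + (if row.head? = some uc ∧ (ff[line]?).getD 0 = 0 then 1000 else 0), ch',
       if (ff[line]?).getD 0 = 0 ∧ uc ∈ row then ff.set line 1 else ff) := by
  by_cases h0 : (ff[line]?).getD 0 = 0
  · cases row with
    | nil => exact ⟨ch, by simp [pvInnerA, h0]⟩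
    | cons c rest =>
        by_cases hc : c = uc
        · refine ⟨ch.set line (line : Int), ?_⟩
          have hrest := pvInnerA_after_set uc line rest 1 one_ne_zero (r + 1000)
            (ch.set line (line : Int)) ff
          simp only [pvInnerA]
          simp [hc, h0, List.getD, hrest]
        · refine ⟨ch, ?_⟩
          simp only [pvInnerA]
          rw [show ((if c == uc then _ else (r, ch, ff)) : Int × List Int × List Int) = (r, ch, ff) by
                simp [hc]]
          rw [pvInnerA_tail uc line rest 1 one_ne_zero r ch ff h0]
          by_cases hm : uc ∈ rest <;> simp [hm, h0, hc, Ne.symm hc]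
  · refine ⟨ch, ?_⟩
    rw [pvInnerA_of_ne uc line row 0 r ch ff h0]
    simp [h0]

-- pvCountB only reads ffirst at the enumerated indices, so a set at a smaller index is invisible
theorem pvCountB_set (uc : String) (ff : List Int) (line : Nat) (v : Int) :
    ∀ (rows : List (List String)) (j : Nat), line < j →
      pvCountB uc (ff.set line v) (PySem.List.enumerate rows (j : Int))
        = pvCountB uc ff (PySem.List.enumerate rows (j : Int)) := by
  intro rows
  induction rows with
  | nil => intro j _; simp [PySem.List.enumerate_nil, pvCountB]
  | cons row rows' ih =>
      intro j hj
      rw [PySem.List.enumerate_cons]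
      simp only [pvCountB]
      have hget : (ff.set line v)[j]? = ff[j]? :=
        List.getElem?_set_ne (by omega : line ≠ j)
      have : ((j : Int) + 1) = ((j + 1 : Nat) : Int) := by push_cast; ring
      rw [this, ih (j + 1) (by omega)]
      simp [PySem.List.pyGetD_natCast, hget]

-- the head term of pvCountB at index line equals A's award indicator
theorem pvCountB_head (uc : String) (row : List String) (ff : List Int) (line : Nat) :
    ((if PySem.List.slice row none (some 1) == [uc] && (PySem.List.pyGetD ff (line : Int) 0 == 0) then 1 else 0) : Int)
      = (if row.head? = some uc ∧ (ff[line]?).getD 0 = 0 then 1 else 0) := by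
  have hs : PySem.List.slice row none (some 1) = row.take 1 := by
    have : ((1 : Int)) = ((1 : Nat) : Int) := by norm_num
    rw [this, PySem.List.slice_to_natCast]
  rw [hs]
  cases row with
  | nil => simp
  | cons c rest =>
      by_cases hc : c = uc <;> simp [hc, List.getD, PySem.List.pyGetD_natCast]

-- MAIN INVARIANT: the result component of A's outer loop is 1000 × B's count of the remaining lines
theorem pvOuterA_fst (uc : String) (rows : List (List String)) :
    ∀ (line : Nat) (r : Int) (ch ff : List Int),
      (pvOuterA uc rows line (r, ch, ff)).1
        = r + 1000 * pvCountB uc ff (PySem.List.enumerate rows (line : Int)) := by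
  induction rows with
  | nil => intro line r ch ff; simp [pvOuterA, PySem.List.enumerate_nil, pvCountB]
  | cons row rows' ih =>
      intro line r ch ff
      obtain ⟨ch', hchar⟩ := pvInnerA_char uc line row r ch ff
      rw [PySem.List.enumerate_cons]
      simp only [pvOuterA, hchar, pvCountB]
      have hcast : ((line : Int) + 1) = ((line + 1 : Nat) : Int) := by push_cast; ring
      by_cases hset : (ff[line]?).getD 0 = 0 ∧ uc ∈ row
      · rw [if_pos hset, ih (line + 1) _ ch' (ff.set line 1), hcast,
            pvCountB_set uc ff line 1 rows' (line + 1) (by omega), pvCountB_head]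
        by_cases hbo : row.head? = some uc ∧ (ff[line]?).getD 0 = 0 <;> simp [hbo] <;> ring
      · rw [if_neg hset, ih (line + 1) _ ch' ff, hcast, pvCountB_head]
        by_cases hbo : row.head? = some uc ∧ (ff[line]?).getD 0 = 0 <;> simp [hbo] <;> ring

-- ===== VERDICT (by name: the statement is the Claim_ definition above) =====
theorem get_1000_dollar_spec : Claim_equal_get_1000_dollar := by
  intro board chance ffirst user_char _ _
  unfold Spec_get_1000_dollar get_1000_dollar get_1000_dollar_alt
  rw [pvOuterA_fst]
  norm_num
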